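-- pv_equiv track=rewrite | github.com/AliNazariii/TML-AUT | HW/2/Main.py | adding_a_grammar
-- ===== SOURCE A (Python) =====
-- def adding_a_grammar(productions, checked, key, vars_list):
--     products = []
--     for p in productions[key]:
--         if len(p) is 1 and p in vars_list:
--             if p not in checked:
--                 checked.append(p)
--                 products.extend(adding_a_grammar(productions, checked, p, vars_list))
--         else:
--             products.append(p)
--     return products
-- ===== SOURCE B (Python) =====
-- def adding_a_grammar(productions, checked, key, vars_list):
--     # Iterative version: explicit stack of frames (remaining productions of each
--     # expanded variable) instead of recursion; same left-to-right flattening and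
--     # the same in-place appends to `checked`.
--     products = []
--     stack = [list(productions[key])]
--     while stack:
--         frame = stack[-1]
--         if not frame:
--             stack.pop()
--             continue
--         p = frame.pop(0)
--         if len(p) == 1 and p in vars_list:
--             if p not in checked:
--                 checked.append(p)
--                 stack.append(list(productions[p]))
--         else:
--             products.append(p)
--     return products
-- ===== Notes on version B (the rewrite author's own statement) =====
-- stated objective: alternative
-- what changed: Replaces the recursive DFS over unit productions by an explicit worklist loop over a stack of frames (remaining productions of each expanded variable), preserving the exact output and checked-append order.
import Mathlib
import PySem

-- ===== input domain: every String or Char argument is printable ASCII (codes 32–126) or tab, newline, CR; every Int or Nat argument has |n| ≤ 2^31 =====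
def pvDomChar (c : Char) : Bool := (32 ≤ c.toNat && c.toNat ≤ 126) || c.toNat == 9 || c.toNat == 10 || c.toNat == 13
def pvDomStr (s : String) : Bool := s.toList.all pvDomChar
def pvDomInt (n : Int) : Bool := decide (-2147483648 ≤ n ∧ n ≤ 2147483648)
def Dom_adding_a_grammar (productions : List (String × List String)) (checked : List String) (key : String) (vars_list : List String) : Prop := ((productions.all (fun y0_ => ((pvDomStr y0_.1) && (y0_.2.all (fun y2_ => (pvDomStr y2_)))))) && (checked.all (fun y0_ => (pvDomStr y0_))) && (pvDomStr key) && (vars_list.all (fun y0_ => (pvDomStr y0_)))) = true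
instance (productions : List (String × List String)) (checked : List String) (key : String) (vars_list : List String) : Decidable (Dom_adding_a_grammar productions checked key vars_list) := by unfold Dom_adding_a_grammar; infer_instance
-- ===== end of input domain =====

-- B replaces A's recursive DFS through unit-production chains by an explicit
-- worklist/stack loop (same output list, same order); equivalence is about the
-- RETURN value only — both Pythons also append the freshly visited unit variables
-- to `checked` in place, in the same order.

-- dict indexing productions[k] (first match); Pre_ guarantees the key is present at
-- every lookup either program performs, so the [] default is never observed inside Pre_
def pyLookup (ps : List (String × List String)) (k : String) : List String :=
  match ps with
  | [] => []
  | (a, b) :: rest => if a == k then b else pyLookup rest k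

-- ===== PORT A =====
-- A's recursion, step for step: `rows` is the remaining part of productions[current key];
-- the result pair is (products, final checked).  `fuel` only makes the recursion total:
-- it bounds the recursion depth (each level adds a fresh var from vars_list to checked,
-- so depth ≤ vars_list.length), and the top-level fuel vars_list.length + 1 is proved
-- sufficient in the lemmas below (the 0-fuel branch is never reached).
def goA (prods : List (String × List String)) (vars : List String) :
    Nat → List String → List String → List String × List String
  | _, [], checked => ([], checked)
  | fuel, p :: rest, checked =>
    if p.length = 1 ∧ p ∈ vars then
      if p ∉ checked then
        match fuel with
        | 0 => ([], checked)   -- unreachable for fuel > number of unvisited vars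
        | f + 1 =>
          let s := goA prods vars f (pyLookup prods p) (checked ++ [p])
          let r := goA prods vars (f + 1) rest s.2
          (s.1 ++ r.1, r.2)
      else goA prods vars fuel rest checked
    else
      let r := goA prods vars fuel rest checked
      (p :: r.1, r.2)
  termination_by fuel rows _ => (fuel, rows.length)

def adding_a_grammar (productions : List (String × List String)) (checked : List String) (key : String) (vars_list : List String) : List String :=
  (goA productions vars_list (vars_list.length + 1) (pyLookup productions key) checked).1

-- ===== PORT B =====
-- termination helper for goB's worklist: marking a fresh var shrinks the unvisited set
theorem pvFilter_lt {p : String} {vars checked : List String} (hp : p ∈ vars) (hnp : p ∉ checked) :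
    (vars.filter (· ∉ checked ++ [p])).length < (vars.filter (· ∉ checked)).length := by
  have hmono : List.Sublist (vars.filter (· ∉ checked ++ [p])) (vars.filter (· ∉ checked)) := by
    apply List.monotone_filter_right
    intro a ha
    simp at ha ⊢
    exact ha.1
  refine Nat.lt_of_le_of_ne hmono.length_le (fun h => ?_)
  have h2 : p ∈ vars.filter (· ∉ checked) := List.mem_filter.2 ⟨hp, by simpa using hnp⟩
  rw [← hmono.eq_of_length h] at h2
  have := List.mem_filter.1 h2
  simp at this

-- B's worklist loop: `stack` holds one frame per expanded variable (head = top of the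
-- Python stack), each frame the not-yet-consumed rest of its productions[·] list.
def goB (prods : List (String × List String)) (vars : List String) :
    List (List String) → List String → List String → List String × List String
  | [], products, checked => (products, checked)
  | [] :: stack, products, checked => goB prods vars stack products checked
  | (p :: frame) :: stack, products, checked =>
    if p.length = 1 ∧ p ∈ vars then
      if p ∉ checked then
        goB prods vars (pyLookup prods p :: frame :: stack) products (checked ++ [p])
      else goB prods vars (frame :: stack) products checked
    else goB prods vars (frame :: stack) (products ++ [p]) checked
  termination_by stack _ checked =>
    ((vars.filter (· ∉ checked)).length, (stack.map List.length).sum + stack.length)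
  decreasing_by
  · simp only [Prod.lex_iff]; right; simp
  · simp only [Prod.lex_iff]; left; exact pvFilter_lt (by tauto) (by tauto)
  · simp [Prod.lex_iff]
  · simp [Prod.lex_iff]

def adding_a_grammar_alt (productions : List (String × List String)) (checked : List String) (key : String) (vars_list : List String) : List String :=
  (goB productions vars_list [pyLookup productions key] [] checked).1

-- ===== PRECONDITION & SPEC =====
-- the set of variables whose productions get looked up, as an order-independent
-- reachability fixpoint: start from the key and add every length-1 production that is
-- in vars_list, not initially checked, and not collected yet (this is NOT the ports'
-- algorithm: no products, no stack, no traversal order — just which keys are reached)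
def pvReachStep (prods : List (String × List String)) (vars checked0 S : List String) : List String :=
  S ++ (S.flatMap (fun q => pyLookup prods q)).filter
        (fun p => decide (p.length = 1) && vars.contains p && !checked0.contains p && !S.contains p)

def pvReach (prods : List (String × List String)) (vars checked0 : List String) :
    Nat → List String → List String
  | 0, S => S
  | n + 1, S => pvReach prods vars checked0 n (pvReachStep prods vars checked0 S)

-- Python A raises KeyError exactly when one of the looked-up variables — the start key
-- or a variable reachable through unit-production chains — is not a key of `productions`;
-- Pre_ excludes exactly those inputs (reachability does not depend on traversal order,
-- so this is A's precise returning domain, not a narrowing).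
def Pre_adding_a_grammar (productions : List (String × List String)) (checked : List String) (key : String) (vars_list : List String) : Prop :=
  ∀ v ∈ pvReach productions vars_list checked (vars_list.length + 1) [key],
    ∃ q ∈ productions, q.1 = v
instance (productions : List (String × List String)) (checked : List String) (key : String) (vars_list : List String) : Decidable (Pre_adding_a_grammar productions checked key vars_list) := by unfold Pre_adding_a_grammar; infer_instance

def pvWitness_adding_a_grammar : (List (String × List String)) × List String × String × List String :=
  ([("S", ["A", "ab"]), ("A", ["a"])], [], "S", ["A", "S"])

def Spec_adding_a_grammar (productions : List (String × List String)) (checked : List String) (key : String) (vars_list : List String) (out : List String) : Prop := out = adding_a_grammar_alt productions checked key vars_list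
instance (productions : List (String × List String)) (checked : List String) (key : String) (vars_list : List String) (out : List String) : Decidable (Spec_adding_a_grammar productions checked key vars_list out) := by unfold Spec_adding_a_grammar; infer_instance

-- ===== CLAIM (what is proved, stated in full; the proofs are below) =====
def Claim_equal_adding_a_grammar : Prop := ∀ (productions : List (String × List String)) (checked : List String) (key : String) (vars_list : List String), Dom_adding_a_grammar productions checked key vars_list → Pre_adding_a_grammar productions checked key vars_list → Spec_adding_a_grammar productions checked key vars_list (adding_a_grammar productions checked key vars_list)

-- ===== LEMMAS AND PROOFS =====
theorem goA_cons_stale (prods : List (String × List String)) (vars : List String)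
    (fuel : Nat) (p : String) (rest checked : List String)
    (h1 : p.length = 1 ∧ p ∈ vars) (h2 : p ∈ checked) :
    goA prods vars fuel (p :: rest) checked = goA prods vars fuel rest checked := by
  cases fuel <;> simp [goA, h1, h2]

theorem goA_cons_else (prods : List (String × List String)) (vars : List String)
    (fuel : Nat) (p : String) (rest checked : List String)
    (h1 : ¬ (p.length = 1 ∧ p ∈ vars)) :
    goA prods vars fuel (p :: rest) checked =
      ((p :: (goA prods vars fuel rest checked).1), (goA prods vars fuel rest checked).2) := by
  cases fuel <;> simp [goA, h1]

-- goA only ever appends to `checked`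
theorem goA_checked_prefix (prods : List (String × List String)) (vars : List String) :
    ∀ fuel rows checked, ∃ t, (goA prods vars fuel rows checked).2 = checked ++ t := by
  intro fuel rows checked
  induction fuel, rows, checked using goA.induct prods vars with
  | case1 a ch => exact ⟨[], by simp [goA]⟩
  | case2 a b c d e => exact ⟨[], by simp [goA, d, e]⟩
  | case3 a b c d e =>
    rename_i f s ih2 ih1
    obtain ⟨t1, ht1⟩ := ih2
    obtain ⟨t2, ht2⟩ := ih1
    have ht2' : (goA prods vars (f + 1) b (c ++ [a] ++ t1)).2 = (c ++ [a] ++ t1) ++ t2 := by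
      rw [← ht1]; exact ht2
    refine ⟨[a] ++ t1 ++ t2, ?_⟩
    simp [goA, d, e, ht1]
    simpa using ht2'
  | case4 a b c d e =>
    rename_i h ih
    obtain ⟨t, ht⟩ := ih
    exact ⟨t, by rw [goA_cons_stale prods vars a b c d e (not_not.1 h)]; exact ht⟩
  | case5 a b c d e =>
    rename_i ih
    obtain ⟨t, ht⟩ := ih
    exact ⟨t, by rw [goA_cons_else prods vars a b c d e]; exact ht⟩

theorem pvFilter_mono {vars c1 c2 : List String} (h : ∀ x, x ∈ c1 → x ∈ c2) :
    (vars.filter (· ∉ c2)).length ≤ (vars.filter (· ∉ c1)).length := by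
  refine List.Sublist.length_le ?_
  apply List.monotone_filter_right
  intro a ha
  simp at ha ⊢
  exact fun hx => ha (h a hx)

-- the simulation: running B's worklist with `rows` on top of the stack equals first
-- running A's recursion on `rows`, then continuing B's loop with its results
theorem goA_goB (prods : List (String × List String)) (vars : List String) :
    ∀ fuel rows checked, (vars.filter (· ∉ checked)).length < fuel →
      ∀ stack products,
        goB prods vars (rows :: stack) products checked =
          goB prods vars stack (products ++ (goA prods vars fuel rows checked).1)
            (goA prods vars fuel rows checked).2 := by
  intro fuel rows checked
  induction fuel, rows, checked using goA.induct prods vars with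
  | case1 a ch =>
    intro _ stack products
    simp [goA, goB]
  | case2 a b c d e =>
    intro h
    exact absurd h (Nat.not_lt_zero _)
  | case3 a b c d e =>
    rename_i f s ih2 ih1
    intro h stack products
    have hlt : (vars.filter (· ∉ c ++ [a])).length < f := by
      have := pvFilter_lt d.2 e
      omega
    have hpre := goA_checked_prefix prods vars f (pyLookup prods a) (c ++ [a])
    obtain ⟨t1, ht1⟩ := hpre
    have hlt2 : (vars.filter (· ∉ (goA prods vars f (pyLookup prods a) (c ++ [a])).2)).length < f + 1 := by
      have hm : (vars.filter (· ∉ (goA prods vars f (pyLookup prods a) (c ++ [a])).2)).length ≤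
          (vars.filter (· ∉ c ++ [a])).length := by
        apply pvFilter_mono
        intro x hx
        rw [ht1]
        exact List.mem_append_left _ hx
      omega
    have e1 := ih2 hlt (b :: stack) products
    have e2 := ih1 hlt2 stack (products ++ (goA prods vars f (pyLookup prods a) (c ++ [a])).1)
    calc goB prods vars ((a :: b) :: stack) products c
        = goB prods vars (pyLookup prods a :: b :: stack) products (c ++ [a]) := by
          simp [goB, d, e]
      _ = goB prods vars (b :: stack)
            (products ++ (goA prods vars f (pyLookup prods a) (c ++ [a])).1)
            (goA prods vars f (pyLookup prods a) (c ++ [a])).2 := e1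
      _ = goB prods vars stack
            (products ++ (goA prods vars f (pyLookup prods a) (c ++ [a])).1 ++
              (goA prods vars (f + 1) b (goA prods vars f (pyLookup prods a) (c ++ [a])).2).1)
            (goA prods vars (f + 1) b (goA prods vars f (pyLookup prods a) (c ++ [a])).2).2 := e2
      _ = goB prods vars stack
            (products ++ (goA prods vars (f + 1) (a :: b) c).1)
            (goA prods vars (f + 1) (a :: b) c).2 := by
          simp [goA, d, e]
  | case4 a b c d e =>
    rename_i h ih
    intro hf stack products
    rw [goA_cons_stale prods vars a b c d e (not_not.1 h)]
    calc goB prods vars ((b :: c) :: stack) products d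
        = goB prods vars (c :: stack) products d := by
          simp [goB, e, not_not.1 h]
      _ = _ := ih hf stack products
  | case5 a b c d e =>
    rename_i ih
    intro hf stack products
    rw [goA_cons_else prods vars a b c d e]
    calc goB prods vars ((b :: c) :: stack) products d
        = goB prods vars (c :: stack) (products ++ [b]) d := by
          simp [goB, e]
      _ = _ := by
          rw [ih hf stack (products ++ [b])]
          simp

-- ===== VERDICT (by name: the statement is the Claim_ definition above) =====
theorem adding_a_grammar_spec : Claim_equal_adding_a_grammar := by
  intro prods checked key vars _ _
  unfold Spec_adding_a_grammar adding_a_grammar adding_a_grammar_alt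
  have h : (vars.filter (· ∉ checked)).length < vars.length + 1 :=
    Nat.lt_succ_of_le (List.length_filter_le _ _)
  rw [goA_goB prods vars (vars.length + 1) (pyLookup prods key) checked h [] []]
  simp [goB]
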